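-- pv_equiv track=rewrite | github.com/yyh0806/Brain | brain/planning/intelligent/replanning_manager.py | _is_related_to_belief
-- ===== SOURCE A (Python) =====
-- def _is_related_to_belief(condition: str, belief: str) -> bool:
--     """判断条件是否与信念相关"""
--     # 简化实现：检查是否有共同的关键词
--     condition_lower = condition.lower()
--     belief_lower = belief.lower()
--
--     # 提取关键词（物体名、位置名等）
--     keywords = ['door', 'kitchen', 'cup', 'water', 'table', 'living_room']
--     for keyword in keywords:
--         if keyword in condition_lower and keyword in belief_lower:
--             return True
--
--     return False
-- ===== SOURCE B (Python) =====
-- def _is_related_to_belief(condition: str, belief: str) -> bool: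
--     """判断条件是否与信念相关"""
--     keywords = ['door', 'kitchen', 'cup', 'water', 'table', 'living_room']
--
--     def matched(text):
--         # scan the text position by position, recording every keyword that
--         # starts at that position
--         t = text.lower()
--         found = set()
--         for i in range(len(t)):
--             for k in keywords:
--                 if t.startswith(k, i):
--                     found.add(k)
--         return found
--
--     return bool(matched(condition) & matched(belief))
-- ===== Notes on version B (the rewrite author's own statement) =====
-- stated objective: alternative
-- what changed: B inverts the traversal: instead of A's per-keyword substring-containment loop over the keyword list, B scans each text position by position, testing at every index which keywords start there (a sliding-window matcher), accumulates the matched-keyword sets for both strings, and reports whether the sets intersect.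
import Mathlib
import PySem

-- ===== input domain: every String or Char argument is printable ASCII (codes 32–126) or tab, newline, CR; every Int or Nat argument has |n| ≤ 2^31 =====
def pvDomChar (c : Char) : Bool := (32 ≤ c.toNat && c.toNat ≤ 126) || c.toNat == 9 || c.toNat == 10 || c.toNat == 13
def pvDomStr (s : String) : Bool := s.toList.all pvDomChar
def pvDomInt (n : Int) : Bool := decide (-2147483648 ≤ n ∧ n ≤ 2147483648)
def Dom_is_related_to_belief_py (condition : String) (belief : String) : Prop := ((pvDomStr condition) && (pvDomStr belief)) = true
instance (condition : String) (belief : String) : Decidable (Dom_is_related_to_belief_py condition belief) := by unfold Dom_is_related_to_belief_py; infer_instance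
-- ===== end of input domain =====

-- ===== PORT A =====
-- B changes: instead of A's per-keyword substring-containment loop, B scans each text
-- position by position collecting the keywords starting there, then intersects (alternative).
def relLoop (cl bl : String) : List String → Bool
  | [] => false
  | k :: rest =>
    if PySem.Str.isIn k cl && PySem.Str.isIn k bl then true else relLoop cl bl rest

def is_related_to_belief_py (condition : String) (belief : String) : Bool :=
  let condition_lower := PySem.Str.lower condition
  let belief_lower := PySem.Str.lower belief
  relLoop condition_lower belief_lower
    ["door", "kitchen", "cup", "water", "table", "living_room"]

-- ===== PORT B =====
def relKeywords : List String := ["door", "kitchen", "cup", "water", "table", "living_room"]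

-- Python t.startswith(k, i) for 0 ≤ i ≤ len(t) is exactly: k is a prefix of t dropped at i.
def matchedKw (text : String) : PySem.Set String :=
  let t := (PySem.Str.lower text).toList
  (PySem.List.pyRange 0 (t.length : Int) 1).foldl
    (fun found i =>
      relKeywords.foldl
        (fun found k =>
          if PySem.Chars.startswith (t.drop i.toNat) k.toList then PySem.Set.add found k
          else found)
        found)
    PySem.Set.empty

def is_related_to_belief_py_alt (condition : String) (belief : String) : Bool :=
  !(PySem.Set.inter (matchedKw condition) (matchedKw belief)).isEmpty

-- ===== PRECONDITION & SPEC =====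
def Spec_is_related_to_belief_py (condition : String) (belief : String) (out : Bool) : Prop := out = is_related_to_belief_py_alt condition belief
instance (condition : String) (belief : String) (out : Bool) : Decidable (Spec_is_related_to_belief_py condition belief out) := by unfold Spec_is_related_to_belief_py; infer_instance

-- ===== CLAIM (what is proved, stated in full; the proofs are below) =====
def Claim_equal_is_related_to_belief_py : Prop := ∀ (condition : String) (belief : String), Dom_is_related_to_belief_py condition belief → Spec_is_related_to_belief_py condition belief (is_related_to_belief_py condition belief)

-- ===== LEMMAS AND PROOFS =====
theorem relLoop_eq_true_iff (cl bl : String) (ks : List String) :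
    relLoop cl bl ks = true ↔ ∃ k ∈ ks, PySem.Str.isIn k cl = true ∧ PySem.Str.isIn k bl = true := by
  induction ks with
  | nil => simp [relLoop]
  | cons k rest ih =>
    simp only [relLoop]
    split_ifs with h
    · simp_all
    · simp only [Bool.and_eq_true] at h
      simp only [ih, List.mem_cons]
      constructor
      · rintro ⟨x, hx, h1, h2⟩; exact ⟨x, Or.inr hx, h1, h2⟩
      · rintro ⟨x, hx | hx, h1, h2⟩
        · subst hx; exact absurd ⟨h1, h2⟩ h
        · exact ⟨x, hx, h1, h2⟩

theorem mem_foldl_addIf (P : String → Bool) (ks : List String) (found : PySem.Set String)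
    (x : String) :
    (x ∈ ks.foldl (fun f k => if P k then PySem.Set.add f k else f) found) ↔
      x ∈ found ∨ (x ∈ ks ∧ P x = true) := by
  induction ks generalizing found with
  | nil => simp
  | cons k rest ih =>
    simp only [List.foldl_cons, ih]
    split_ifs with h
    · rw [PySem.Set.mem_add]
      constructor
      · rintro (⟨hf | he⟩ | hr)
        · exact Or.inl hf
        · subst he; exact Or.inr ⟨List.mem_cons_self, h⟩
        · exact Or.inr ⟨List.mem_cons_of_mem _ hr.1, hr.2⟩
      · rintro (hf | ⟨hm, hp⟩)
        · exact Or.inl (Or.inl hf)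
        · rcases List.mem_cons.mp hm with he | hr
          · exact Or.inl (Or.inr he)
          · exact Or.inr ⟨hr, hp⟩
    · constructor
      · rintro (hf | hr)
        · exact Or.inl hf
        · exact Or.inr ⟨List.mem_cons_of_mem _ hr.1, hr.2⟩
      · rintro (hf | ⟨hm, hp⟩)
        · exact Or.inl hf
        · rcases List.mem_cons.mp hm with he | hr
          · subst he; exact absurd hp h
          · exact Or.inr ⟨hr, hp⟩

theorem mem_double_foldl (Q : Int → String → Bool) (is : List Int)
    (found : PySem.Set String) (x : String) :
    (x ∈ is.foldl
        (fun f i => relKeywords.foldl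
          (fun f k => if Q i k then PySem.Set.add f k else f) f) found) ↔
      x ∈ found ∨ (x ∈ relKeywords ∧ ∃ i ∈ is, Q i x = true) := by
  induction is generalizing found with
  | nil => simp
  | cons i rest ih =>
    simp only [List.foldl_cons, ih, mem_foldl_addIf]
    constructor
    · rintro ((hf | ⟨hm, hq⟩) | ⟨hm, j, hj, hq⟩)
      · exact Or.inl hf
      · exact Or.inr ⟨hm, i, List.mem_cons_self, hq⟩
      · exact Or.inr ⟨hm, j, List.mem_cons_of_mem _ hj, hq⟩
    · rintro (hf | ⟨hm, j, hj, hq⟩)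
      · exact Or.inl (Or.inl hf)
      · rcases List.mem_cons.mp hj with he | hr
        · subst he; exact Or.inl (Or.inr ⟨hm, hq⟩)
        · exact Or.inr ⟨hm, j, hr, hq⟩

theorem mem_matchedKw (text : String) (x : String) :
    (x ∈ matchedKw text) ↔
      x ∈ relKeywords ∧
        ∃ i ∈ PySem.List.pyRange 0 (((PySem.Str.lower text).toList.length : Int)) 1,
          PySem.Chars.startswith ((PySem.Str.lower text).toList.drop i.toNat) x.toList = true := by
  unfold matchedKw
  rw [mem_double_foldl]
  simp [PySem.Set.empty]

theorem scanned_iff (t : List Char) (x : String) (hx : x.toList ≠ []) :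
    (∃ i ∈ PySem.List.pyRange 0 (t.length : Int) 1,
        PySem.Chars.startswith (t.drop i.toNat) x.toList = true) ↔
      PySem.Chars.isIn x.toList t = true := by
  rw [← PySem.Chars.exists_prefix_drop_iff_isIn]
  constructor
  · rintro ⟨i, _, hs⟩
    exact ⟨i.toNat, (PySem.Chars.startswith_iff _ _).mp hs⟩
  · rintro ⟨j, hpre⟩
    have hj : j < t.length := by
      by_contra hge
      push_neg at hge
      rw [List.drop_eq_nil_of_le hge] at hpre
      exact hx (List.prefix_nil.mp hpre)
    refine ⟨(j : Int), ?_, ?_⟩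
    · rw [PySem.List.mem_pyRange_one]
      exact ⟨Int.natCast_nonneg j, by exact_mod_cast hj⟩
    · rw [PySem.Chars.startswith_iff]
      simpa using hpre

theorem matched_iff (text : String) (x : String) (hx : x.toList ≠ []) :
    (x ∈ matchedKw text) ↔ x ∈ relKeywords ∧ PySem.Str.isIn x (PySem.Str.lower text) = true := by
  rw [mem_matchedKw, PySem.Str.isIn_iff_infix, ← PySem.Chars.isIn_iff_infix,
    ← scanned_iff _ _ hx]

theorem ports_agree (condition belief : String) :
    is_related_to_belief_py condition belief = is_related_to_belief_py_alt condition belief := by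
  unfold is_related_to_belief_py is_related_to_belief_py_alt
  have hne : ∀ k ∈ relKeywords, k.toList ≠ [] := by decide
  rw [Bool.eq_iff_iff, relLoop_eq_true_iff, Bool.not_eq_eq_eq_not, Bool.not_true,
      List.isEmpty_eq_false_iff_exists_mem]
  constructor
  · rintro ⟨k, hk, h1, h2⟩
    refine ⟨k, ?_⟩
    rw [PySem.Set.mem_inter, matched_iff _ _ (hne k hk), matched_iff _ _ (hne k hk)]
    exact ⟨⟨hk, h1⟩, ⟨hk, h2⟩⟩
  · rintro ⟨k, hk⟩
    rw [PySem.Set.mem_inter] at hk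
    have hkm : k ∈ relKeywords := ((mem_matchedKw condition k).mp hk.1).1
    rw [matched_iff _ _ (hne k hkm)] at hk
    rw [matched_iff _ _ (hne k hkm)] at hk
    exact ⟨k, hkm, hk.1.2, hk.2.2⟩

-- ===== VERDICT (by name: the statement is the Claim_ definition above) =====
theorem is_related_to_belief_py_spec : Claim_equal_is_related_to_belief_py := by
  intro condition belief _
  unfold Spec_is_related_to_belief_py
  exact ports_agree condition belief
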